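-- pv_equiv track=rewrite | github.com/pang-pangho/mob_test | src/decrypt_apk.py | find_strings_of_specific_lengths
-- ===== SOURCE A (Python) =====
-- def find_strings_of_specific_lengths(data, lengths):
--     """특정 길이의 문자열 추출"""
--     strings = []
--     result = ""
--
--     for c in data:
--         if 32 <= c < 127:  # 출력 가능한 ASCII 문자
--             result += chr(c)
--         else:
--             if len(result) in lengths:
--                 strings.append(result)
--             result = ""
--
--     if len(result) in lengths:
--         strings.append(result)
--
--     return strings
-- ===== SOURCE B (Python) =====
-- def find_strings_of_specific_lengths(data, lengths):
--     # Span-jumping two-index scan: advance j over one whole maximal printable run,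
--     # decide the slice data[i:j] by its length, then jump i past the separator.
--     out = []
--     n = len(data)
--     i = 0
--     while True:
--         j = i
--         while j < n and 32 <= data[j] < 127:
--             j += 1
--         if j - i in lengths:
--             out.append(''.join(map(chr, data[i:j])))
--         if j == n:
--             return out
--         i = j + 1
-- ===== Notes on version B (the rewrite author's own statement) =====
-- stated objective: alternative
-- what changed: A iterates char-by-char, growing a current string and flushing/filtering it at every non-printable boundary (plus a final flush); B is a span-jumping two-index scan: an inner scan advances j over one whole maximal printable run, the slice data[i:j] is decided by its length, and i jumps past the separator.
import Mathlib
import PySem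

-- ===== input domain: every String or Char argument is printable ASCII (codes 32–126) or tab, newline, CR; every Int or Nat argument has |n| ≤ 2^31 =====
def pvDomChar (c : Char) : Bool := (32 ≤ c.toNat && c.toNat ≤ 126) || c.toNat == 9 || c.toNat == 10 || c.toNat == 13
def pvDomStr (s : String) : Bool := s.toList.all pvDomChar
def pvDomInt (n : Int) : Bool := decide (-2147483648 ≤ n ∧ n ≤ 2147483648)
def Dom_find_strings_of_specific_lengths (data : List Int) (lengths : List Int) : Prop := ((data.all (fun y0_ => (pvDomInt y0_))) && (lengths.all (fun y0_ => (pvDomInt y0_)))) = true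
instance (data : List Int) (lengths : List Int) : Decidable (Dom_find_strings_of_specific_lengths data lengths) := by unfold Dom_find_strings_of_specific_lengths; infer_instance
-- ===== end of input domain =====

-- B changes the decomposition: A is a char-by-char accumulate-and-flush loop;
-- B is a span-jumping two-index scan consuming one whole maximal printable run per step ('alternative').

-- ===== PORT A =====
-- A's loop body: extend the current run on a printable char, otherwise flush it (if its length is wanted) and reset.
def pvStepA (lengths : List Int) (st : List String × List Char) (c : Int) : List String × List Char :=
  if 32 ≤ c ∧ c < 127 then (st.1, st.2 ++ [Char.ofNat c.toNat])
  else if (st.2.length : Int) ∈ lengths then (st.1 ++ [String.ofList st.2], []) else (st.1, [])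

def find_strings_of_specific_lengths (data : List Int) (lengths : List Int) : List String :=
  let st := data.foldl (pvStepA lengths) ([], [])
  if (st.2.length : Int) ∈ lengths then st.1 ++ [String.ofList st.2] else st.1

-- ===== PORT B =====
-- Source B's printable test 32 <= data[j] < 127
def pvPrintable (c : Int) : Bool := decide (32 ≤ c ∧ c < 127)

-- Source B's outer 'while True' over the suffix data[i:]: the inner
-- 'while j < n and printable(data[j]): j += 1' scan is the length of the longest printable
-- prefix of the suffix; 'j == n' is 'the run covers the whole suffix'; 'i = j + 1' drops
-- the run and the separator.
def pvAltLoop (lengths : List Int) (out : List String) (rest : List Int) : List String :=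
  let run := rest.takeWhile pvPrintable
  let out' := if (run.length : Int) ∈ lengths
              then out ++ [String.ofList (run.map (fun c => Char.ofNat c.toNat))] else out
  if run.length = rest.length then out'
  else pvAltLoop lengths out' (rest.drop (run.length + 1))
termination_by rest.length
decreasing_by
  have h1 : run.length ≤ rest.length := (List.takeWhile_prefix pvPrintable).length_le
  simp only [List.length_drop]
  omega

def find_strings_of_specific_lengths_alt (data : List Int) (lengths : List Int) : List String :=
  pvAltLoop lengths [] data

-- ===== PRECONDITION & SPEC =====
def Spec_find_strings_of_specific_lengths (data : List Int) (lengths : List Int) (out : List String) : Prop := out = find_strings_of_specific_lengths_alt data lengths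
instance (data : List Int) (lengths : List Int) (out : List String) : Decidable (Spec_find_strings_of_specific_lengths data lengths out) := by unfold Spec_find_strings_of_specific_lengths; infer_instance

-- ===== CLAIM (what is proved, stated in full; the proofs are below) =====
def Claim_equal_find_strings_of_specific_lengths : Prop := ∀ (data : List Int) (lengths : List Int), Dom_find_strings_of_specific_lengths data lengths → Spec_find_strings_of_specific_lengths data lengths (find_strings_of_specific_lengths data lengths)

-- ===== LEMMAS AND PROOFS =====

-- the run list A's loop produces, as a structural recursion (cons at the front)
def pvSegs : List Int → List (List Char)
  | [] => [[]]
  | c :: rest =>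
    if 32 ≤ c ∧ c < 127 then (Char.ofNat c.toNat :: (pvSegs rest).headI) :: (pvSegs rest).tail
    else [] :: pvSegs rest

theorem pvSegs_ne_nil (data : List Int) : pvSegs data ≠ [] := by
  cases data with
  | nil => simp [pvSegs]
  | cons c rest => simp only [pvSegs]; split <;> simp

theorem pvSegs_cons_headI_tail (data : List Int) :
    (pvSegs data).headI :: (pvSegs data).tail = pvSegs data := by
  cases hd : pvSegs data with
  | nil => exact absurd hd (pvSegs_ne_nil data)
  | cons a b => simp

-- filtered/mapped output of a run list
def pvOut (lengths : List Int) (xs : List (List Char)) : List String :=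
  (xs.filter (fun s => decide ((s.length : Int) ∈ lengths))).map (fun s => String.ofList s)

-- A's loop, from any accumulator state, appends exactly the filtered runs
theorem loopA_eq (lengths : List Int) : ∀ (data : List Int) (acc : List String) (cur : List Char),
    (let st := data.foldl (pvStepA lengths) (acc, cur);
     if (st.2.length : Int) ∈ lengths then st.1 ++ [String.ofList st.2] else st.1)
      = acc ++ pvOut lengths ((cur ++ (pvSegs data).headI) :: (pvSegs data).tail) := by
  intro data
  induction data with
  | nil =>
    intro acc cur
    simp only [pvSegs, List.foldl_nil, List.headI, List.tail, pvOut]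
    by_cases h : (cur.length : Int) ∈ lengths <;> simp [h]
  | cons c rest ih =>
    intro acc cur
    by_cases h : 32 ≤ c ∧ c < 127
    · simp only [List.foldl_cons, pvStepA, if_pos h]
      rw [ih acc (cur ++ [Char.ofNat c.toNat])]
      simp only [pvSegs, if_pos h, List.headI_cons, List.tail_cons, List.append_assoc,
        List.singleton_append]
    · simp only [List.foldl_cons, pvStepA, if_neg h]
      have h1 : pvSegs (c :: rest) = [] :: pvSegs rest := by simp [pvSegs, h]
      by_cases hc : (cur.length : Int) ∈ lengths
      · rw [if_pos hc, ih (acc ++ [String.ofList cur]) [], h1]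
        simp only [List.nil_append, pvSegs_cons_headI_tail, List.headI_cons, List.tail_cons,
          pvOut, List.filter_cons]
        simp [hc]
      · rw [if_neg hc, ih acc [], h1]
        simp only [List.nil_append, pvSegs_cons_headI_tail, List.headI_cons, List.tail_cons,
          pvOut, List.filter_cons]
        simp [hc]

theorem A_eq_segs (data lengths : List Int) :
    find_strings_of_specific_lengths data lengths = pvOut lengths (pvSegs data) := by
  have h := loopA_eq lengths data [] []
  simp only [List.nil_append] at h
  rw [find_strings_of_specific_lengths, h, pvSegs_cons_headI_tail]

-- span decomposition of the run list
theorem segs_span (data : List Int) :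
    pvSegs data =
      ((data.takeWhile pvPrintable).map (fun c => Char.ofNat c.toNat)) ::
      (if (data.takeWhile pvPrintable).length = data.length then ([] : List (List Char))
       else pvSegs (data.drop ((data.takeWhile pvPrintable).length + 1))) := by
  induction data with
  | nil => simp [pvSegs]
  | cons c rest ih =>
    by_cases h : 32 ≤ c ∧ c < 127
    · have hp : pvPrintable c = true := by simp [pvPrintable, h]
      have htw : (c :: rest).takeWhile pvPrintable = c :: rest.takeWhile pvPrintable := by
        simp [hp]
      rw [pvSegs, if_pos h, ih, htw]
      by_cases hl : (rest.takeWhile pvPrintable).length = rest.length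
      · simp [hl]
      · have hl' : ¬ ((c :: rest.takeWhile pvPrintable).length = (c :: rest).length) := by
          simp [hl]
        simp only [if_neg hl, List.headI_cons, List.tail_cons, List.map_cons,
          List.length_cons, List.drop_succ_cons]
        simp [hl]
    · have hp : pvPrintable c = false := by simp [pvPrintable, h]
      have htw : (c :: rest).takeWhile pvPrintable = [] := by
        simp [hp]
      have hlen : ¬ (([] : List Int).length = (c :: rest).length) := by simp
      rw [pvSegs, if_neg h, htw, if_neg (by simp)]
      simp

theorem altLoop_eq_segs (lengths : List Int) : ∀ (rest : List Int) (out : List String),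
    pvAltLoop lengths out rest = out ++ pvOut lengths (pvSegs rest) := by
  intro rest out
  fun_induction pvAltLoop lengths out rest with
  | case1 out rest run out' h =>
    rw [segs_span rest, if_pos h]
    have hsl : (run.map (fun c => Char.ofNat c.toNat)).length = run.length := by simp
    by_cases hm : (run.length : Int) ∈ lengths <;>
      simp [out', run, pvOut, hsl, hm]
  | case2 out rest run out' h ih =>
    rw [ih, segs_span rest, if_neg h]
    have hsl : (run.map (fun c => Char.ofNat c.toNat)).length = run.length := by simp
    by_cases hm : (run.length : Int) ∈ lengths <;>
      simp [out', run, pvOut, hsl, hm]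

theorem alt_eq_segs (data lengths : List Int) :
    find_strings_of_specific_lengths_alt data lengths = pvOut lengths (pvSegs data) := by
  have h := altLoop_eq_segs lengths data []
  simpa [find_strings_of_specific_lengths_alt] using h

-- ===== VERDICT (by name: the statement is the Claim_ definition above) =====
theorem find_strings_of_specific_lengths_spec : Claim_equal_find_strings_of_specific_lengths := by
  intro data lengths _
  unfold Spec_find_strings_of_specific_lengths
  rw [A_eq_segs, alt_eq_segs]
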